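-- pv_equiv track=rewrite | github.com/mfldavidson/dfs_nsc_import_prep | tools.py | degree_type
-- ===== SOURCE A (Python) =====
-- def degree_type(degree_title):
--     '''
--     Given a degree title (such as "Certificate of Completion" or "Bachelor of
--     Applied Science"), return the type of degree from the list Certificate,
--     Associate, Bachelor, Master, PhD, JD, MD.
--     '''
--     degrees = ['Certificate', 'Associate', 'Bachelor', 'Master', 'PhD', 'JD', 'MD']
--
--     for degree in degrees:
--         upper = degree.upper()
--         if upper in degree_title:
--             return degree
--         elif upper + 'S' in degree_title:
--             return degree
--         else:
--             if 'DOCTORATE' in degree_title: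
--                 return 'PhD'
--             elif 'PHILOSOPHY' in degree_title:
--                 return 'PhD'
--             elif 'JURIS' in degree_title:
--                 return 'JD'
--             elif 'MEDICAL' in degree_title:
--                 return 'MD'
--             elif 'MEDICINE' in degree_title:
--                 return 'MD'
-- ===== SOURCE B (Python) =====
-- _TABLE = [
--     (('CERTIFICATE',), 'Certificate'),
--     (('DOCTORATE', 'PHILOSOPHY'), 'PhD'),
--     (('JURIS',), 'JD'),
--     (('MEDICAL', 'MEDICINE'), 'MD'),
--     (('ASSOCIATE',), 'Associate'),
--     (('BACHELOR',), 'Bachelor'),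
--     (('MASTER',), 'Master'),
--     (('PHD',), 'PhD'),
--     (('JD',), 'JD'),
--     (('MD',), 'MD'),
-- ]
--
-- def degree_type(degree_title):
--     '''Single priority-table scan: first entry with a matching substring wins.'''
--     for subs, result in _TABLE:
--         if any(s in degree_title for s in subs):
--             return result
--     return None
-- ===== Notes on version B (the rewrite author's own statement) =====
-- stated objective: simpler
-- what changed: Replaces the loop over degree names with per-iteration plural and special-case re-checks by a single ordered (substrings, result) priority table scanned once; the redundant plural-suffix tests and the repeated DOCTORATE/PHILOSOPHY/JURIS/MEDICAL/MEDICINE chain disappear.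
import Mathlib
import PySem

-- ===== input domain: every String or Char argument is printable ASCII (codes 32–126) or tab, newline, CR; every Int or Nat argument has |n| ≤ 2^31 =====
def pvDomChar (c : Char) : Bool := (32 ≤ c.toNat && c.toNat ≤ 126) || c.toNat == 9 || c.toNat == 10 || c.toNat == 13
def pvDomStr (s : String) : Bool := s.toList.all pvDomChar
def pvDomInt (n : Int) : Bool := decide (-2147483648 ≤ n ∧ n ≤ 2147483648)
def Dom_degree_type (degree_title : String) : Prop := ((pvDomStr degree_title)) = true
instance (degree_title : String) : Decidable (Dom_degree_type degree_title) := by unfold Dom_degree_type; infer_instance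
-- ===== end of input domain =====

-- B replaces A's loop (with its per-iteration plural and special-case re-checks) by one ordered
-- priority table scanned once; objective: simpler. Equivalence proved on all inputs (both total).

-- ===== PORT A =====
-- the for-loop over `degrees`, early returns become the Option result
def degreeLoop (t : List Char) : List String → Option String
  | [] => none
  | d :: rest =>
    let upper := PySem.Chars.upper d.toList
    if PySem.Chars.isIn upper t then some d
    else if PySem.Chars.isIn (upper ++ ['S']) t then some d
    else
      if PySem.Chars.isIn "DOCTORATE".toList t then some "PhD"
      else if PySem.Chars.isIn "PHILOSOPHY".toList t then some "PhD"
      else if PySem.Chars.isIn "JURIS".toList t then some "JD"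
      else if PySem.Chars.isIn "MEDICAL".toList t then some "MD"
      else if PySem.Chars.isIn "MEDICINE".toList t then some "MD"
      else degreeLoop t rest

def degree_type (degree_title : String) : Option String :=
  degreeLoop degree_title.toList
    ["Certificate", "Associate", "Bachelor", "Master", "PhD", "JD", "MD"]

-- ===== PORT B =====
def degreeTable : List (List (List Char) × String) :=
  [(["CERTIFICATE".toList], "Certificate"),
   (["DOCTORATE".toList, "PHILOSOPHY".toList], "PhD"),
   (["JURIS".toList], "JD"),
   (["MEDICAL".toList, "MEDICINE".toList], "MD"),
   (["ASSOCIATE".toList], "Associate"),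
   (["BACHELOR".toList], "Bachelor"),
   (["MASTER".toList], "Master"),
   (["PHD".toList], "PhD"),
   (["JD".toList], "JD"),
   (["MD".toList], "MD")]

def tableScan (t : List Char) : List (List (List Char) × String) → Option String
  | [] => none
  | (subs, res) :: rest =>
    if subs.any (fun s => PySem.Chars.isIn s t) then some res else tableScan t rest

def degree_type_alt (degree_title : String) : Option String :=
  tableScan degree_title.toList degreeTable

-- ===== PRECONDITION & SPEC =====
def Spec_degree_type (degree_title : String) (out : Option String) : Prop := out = degree_type_alt degree_title
instance (degree_title : String) (out : Option String) : Decidable (Spec_degree_type degree_title out) := by unfold Spec_degree_type; infer_instance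

-- ===== CLAIM (what is proved, stated in full; the proofs are below) =====
def Claim_equal_degree_type : Prop := ∀ (degree_title : String), Dom_degree_type degree_title → Spec_degree_type degree_title (degree_type degree_title)

-- ===== LEMMAS AND PROOFS =====

-- if X is not a substring of t, neither is X ++ ['S'] (A's plural check is subsumed)
theorem isIn_append_S_false {x t : List Char} (h : PySem.Chars.isIn x t = false) :
    PySem.Chars.isIn (x ++ ['S']) t = false := by
  rw [PySem.Chars.isIn_eq_false_iff] at h ⊢
  intro hin
  exact h ((List.prefix_append x ['S']).isInfix.trans hin)

theorem degree_type_eq (t : List Char) :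
    degreeLoop t ["Certificate", "Associate", "Bachelor", "Master", "PhD", "JD", "MD"]
      = tableScan t degreeTable := by
  have e1 : PySem.Chars.upper "Certificate".toList = "CERTIFICATE".toList := by decide
  have e2 : PySem.Chars.upper "Associate".toList = "ASSOCIATE".toList := by decide
  have e3 : PySem.Chars.upper "Bachelor".toList = "BACHELOR".toList := by decide
  have e4 : PySem.Chars.upper "Master".toList = "MASTER".toList := by decide
  have e5 : PySem.Chars.upper "PhD".toList = "PHD".toList := by decide
  have e6 : PySem.Chars.upper "JD".toList = "JD".toList := by decide
  have e7 : PySem.Chars.upper "MD".toList = "MD".toList := by decide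
  by_cases hC : PySem.Chars.isIn "CERTIFICATE".toList t = true
  · simp_all [degreeLoop, tableScan, degreeTable, e1, e2, e3, e4, e5, e6, e7]
  rw [Bool.not_eq_true] at hC
  have hCS := isIn_append_S_false hC
  by_cases hD : PySem.Chars.isIn "DOCTORATE".toList t = true
  · simp_all [degreeLoop, tableScan, degreeTable, e1, e2, e3, e4, e5, e6, e7]
  rw [Bool.not_eq_true] at hD
  by_cases hP : PySem.Chars.isIn "PHILOSOPHY".toList t = true
  · simp_all [degreeLoop, tableScan, degreeTable, e1, e2, e3, e4, e5, e6, e7]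
  rw [Bool.not_eq_true] at hP
  by_cases hJ : PySem.Chars.isIn "JURIS".toList t = true
  · simp_all [degreeLoop, tableScan, degreeTable, e1, e2, e3, e4, e5, e6, e7]
  rw [Bool.not_eq_true] at hJ
  by_cases hM1 : PySem.Chars.isIn "MEDICAL".toList t = true
  · simp_all [degreeLoop, tableScan, degreeTable, e1, e2, e3, e4, e5, e6, e7]
  rw [Bool.not_eq_true] at hM1
  by_cases hM2 : PySem.Chars.isIn "MEDICINE".toList t = true
  · simp_all [degreeLoop, tableScan, degreeTable, e1, e2, e3, e4, e5, e6, e7]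
  rw [Bool.not_eq_true] at hM2
  by_cases hA : PySem.Chars.isIn "ASSOCIATE".toList t = true
  · simp_all [degreeLoop, tableScan, degreeTable, e1, e2, e3, e4, e5, e6, e7]
  rw [Bool.not_eq_true] at hA
  have hAS := isIn_append_S_false hA
  by_cases hB : PySem.Chars.isIn "BACHELOR".toList t = true
  · simp_all [degreeLoop, tableScan, degreeTable, e1, e2, e3, e4, e5, e6, e7]
  rw [Bool.not_eq_true] at hB
  have hBS := isIn_append_S_false hB
  by_cases hM : PySem.Chars.isIn "MASTER".toList t = true
  · simp_all [degreeLoop, tableScan, degreeTable, e1, e2, e3, e4, e5, e6, e7]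
  rw [Bool.not_eq_true] at hM
  have hMS := isIn_append_S_false hM
  by_cases hPh : PySem.Chars.isIn "PHD".toList t = true
  · simp_all [degreeLoop, tableScan, degreeTable, e1, e2, e3, e4, e5, e6, e7]
  rw [Bool.not_eq_true] at hPh
  have hPhS := isIn_append_S_false hPh
  by_cases hJd : PySem.Chars.isIn "JD".toList t = true
  · simp_all [degreeLoop, tableScan, degreeTable, e1, e2, e3, e4, e5, e6, e7]
  rw [Bool.not_eq_true] at hJd
  have hJdS := isIn_append_S_false hJd
  by_cases hMd : PySem.Chars.isIn "MD".toList t = true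
  · simp_all [degreeLoop, tableScan, degreeTable, e1, e2, e3, e4, e5, e6, e7]
  rw [Bool.not_eq_true] at hMd
  have hMdS := isIn_append_S_false hMd
  simp_all [degreeLoop, tableScan, degreeTable, e1, e2, e3, e4, e5, e6, e7]

-- ===== VERDICT (by name: the statement is the Claim_ definition above) =====
theorem degree_type_spec : Claim_equal_degree_type := by
  intro t _
  show degree_type t = degree_type_alt t
  exact degree_type_eq t.toList
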